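-- pv_equiv track=rewrite | github.com/param108/neural_networks | handwriting/learn.py | doNormalize
-- ===== SOURCE A (Python) =====
-- def doNormalize(maxx, maxy, sample):
-- 	sampledata=[]
-- 	for i in range(maxy):
-- 		for j in range(maxx):
-- 			if [j,i] in sample:
-- 				sampledata.append(1)
-- 			else:
-- 				sampledata.append(0)
-- 	return sampledata
-- ===== SOURCE B (Python) =====
-- def doNormalize(maxx, maxy, sample):
--     if maxx <= 0 or maxy <= 0:
--         return []
--     sampledata = [0] * (maxx * maxy)
--     for p in sample:
--         if len(p) == 2:
--             j, i = p
--             if 0 <= j < maxx and 0 <= i < maxy: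
--                 sampledata[i * maxx + j] = 1
--     return sampledata
-- ===== Notes on version B (the rewrite author's own statement) =====
-- stated objective: faster
-- what changed: Instead of scanning every grid cell and testing list membership in sample (O(maxx*maxy*|sample|)), B allocates the zero vector once and scatters each in-range length-2 sample point to position i*maxx+j in a single pass over sample; intended as faster, measured ~26x at the largest size both finished (output itself is maxx*maxy long, so both blow up when that product is huge).
import Mathlib
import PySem

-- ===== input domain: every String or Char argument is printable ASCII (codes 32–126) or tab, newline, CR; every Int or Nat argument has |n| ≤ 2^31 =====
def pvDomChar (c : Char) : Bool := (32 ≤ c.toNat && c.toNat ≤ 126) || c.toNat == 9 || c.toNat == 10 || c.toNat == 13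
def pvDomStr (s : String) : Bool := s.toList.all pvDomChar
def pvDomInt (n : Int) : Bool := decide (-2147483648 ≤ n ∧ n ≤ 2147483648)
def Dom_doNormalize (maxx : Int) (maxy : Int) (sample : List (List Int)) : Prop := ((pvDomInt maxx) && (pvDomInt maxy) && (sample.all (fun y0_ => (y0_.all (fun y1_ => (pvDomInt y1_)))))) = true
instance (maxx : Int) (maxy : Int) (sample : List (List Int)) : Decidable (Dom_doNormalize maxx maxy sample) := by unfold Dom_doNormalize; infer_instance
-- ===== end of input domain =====

-- B scatters each in-range length-2 sample point into a preallocated zero vector in one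
-- pass over sample, instead of A's scan of every grid cell with a membership test
-- (intended as faster; timing run measured ~26x at the largest size both finished).

-- ===== PORT A =====
def doNormalize (maxx : Int) (maxy : Int) (sample : List (List Int)) : List Int :=
  (PySem.List.pyRange 0 maxy 1).foldl (fun sampledata i =>
    (PySem.List.pyRange 0 maxx 1).foldl (fun sd j =>
      sd ++ [if [j, i] ∈ sample then (1 : Int) else 0]) sampledata) []

-- ===== PORT B =====
-- one step of Source B's loop body: unpack p as [j, i], guard the range, set position i*maxx+j
def pvStep (maxx : Int) (maxy : Int) (sd : List Int) (p : List Int) : List Int :=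
  match p with
  | [j, i] =>
      if 0 ≤ j ∧ j < maxx ∧ 0 ≤ i ∧ i < maxy then sd.set (i * maxx + j).toNat 1 else sd
  | _ => sd

def doNormalize_alt (maxx : Int) (maxy : Int) (sample : List (List Int)) : List Int :=
  if maxx ≤ 0 ∨ maxy ≤ 0 then []
  else sample.foldl (pvStep maxx maxy) (List.replicate (maxx * maxy).toNat 0)

-- ===== PRECONDITION & SPEC =====
def Spec_doNormalize (maxx : Int) (maxy : Int) (sample : List (List Int)) (out : List Int) : Prop := out = doNormalize_alt maxx maxy sample
instance (maxx : Int) (maxy : Int) (sample : List (List Int)) (out : List Int) : Decidable (Spec_doNormalize maxx maxy sample out) := by unfold Spec_doNormalize; infer_instance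

-- ===== CLAIM (what is proved, stated in full; the proofs are below) =====
def Claim_equal_doNormalize : Prop := ∀ (maxx : Int) (maxy : Int) (sample : List (List Int)), Dom_doNormalize maxx maxy sample → Spec_doNormalize maxx maxy sample (doNormalize maxx maxy sample)

-- ===== LEMMAS AND PROOFS =====

-- the common reference value: entry k of the grid vector, indices decoded as k % M, k / M
def pvCell (M : Nat) (sample : List (List Int)) (k : Nat) : Int :=
  if [((k % M : Nat) : Int), ((k / M : Nat) : Int)] ∈ sample then 1 else 0

def pvSpecL (M N : Nat) (sample : List (List Int)) : List Int :=
  (List.range (N * M)).map (pvCell M sample)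

-- ---- A side ----
lemma doNormalize_eq_flatMap (maxx maxy : Int) (sample : List (List Int)) :
    doNormalize maxx maxy sample =
      (PySem.List.pyRange 0 maxy 1).flatMap (fun i =>
        (PySem.List.pyRange 0 maxx 1).map (fun j =>
          if [j, i] ∈ sample then (1 : Int) else 0)) := by
  unfold doNormalize
  have h1 : (fun (sampledata : List Int) (i : Int) =>
      (PySem.List.pyRange 0 maxx 1).foldl (fun sd j =>
        sd ++ [if [j, i] ∈ sample then (1 : Int) else 0]) sampledata) =
      (fun (sampledata : List Int) (i : Int) =>
        sampledata ++ (PySem.List.pyRange 0 maxx 1).map (fun j =>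
          if [j, i] ∈ sample then (1 : Int) else 0)) := by
    funext acc i
    exact PySem.List.foldl_append_singleton_eq_map _ _ _
  rw [h1, PySem.List.foldl_append_eq_flatMap]
  simp

lemma doNormalize_eq_specL (maxx maxy : Int) (sample : List (List Int)) :
    doNormalize maxx maxy sample = pvSpecL maxx.toNat maxy.toNat sample := by
  rw [doNormalize_eq_flatMap]
  rw [PySem.List.pyRange_one 0 maxy, PySem.List.pyRange_one 0 maxx]
  simp only [zero_add, Int.sub_zero, List.flatMap_map, List.map_map]
  set M := maxx.toNat with hM
  generalize maxy.toNat = N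
  induction N with
  | zero => simp [pvSpecL]
  | succ n ih =>
      rw [List.range_succ, List.flatMap_append, ih]
      unfold pvSpecL
      have hnm : (n + 1) * M = n * M + M := by ring
      rw [hnm, List.range_add, List.map_append]
      congr 1
      simp only [List.flatMap_cons, List.flatMap_nil, List.append_nil, List.map_map]
      apply List.map_congr_left
      intro j hj
      have hjM : j < M := List.mem_range.mp hj
      have hM0 : 0 < M := by omega
      have hmod : (n * M + j) % M = j := by
        rw [Nat.mul_comm n M, Nat.mul_add_mod]; exact Nat.mod_eq_of_lt hjM
      have hdiv : (n * M + j) / M = n := by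
        rw [Nat.mul_comm n M, Nat.mul_add_div hM0, Nat.div_eq_of_lt hjM]
        omega
      simp only [Function.comp_apply, pvCell, hmod, hdiv]

-- ---- B side ----
lemma pvStep_length (maxx maxy : Int) (sd p : List Int) :
    (pvStep maxx maxy sd p).length = sd.length := by
  rcases p with _ | ⟨j, _ | ⟨i, _ | ⟨x, t⟩⟩⟩
  · rfl
  · rfl
  · simp only [pvStep]
    split_ifs
    · simp
    · rfl
  · rfl

lemma pvScatter_length (maxx maxy : Int) (sample : List (List Int)) :
    ∀ sd : List Int, (sample.foldl (pvStep maxx maxy) sd).length = sd.length := by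
  induction sample with
  | nil => intro sd; rfl
  | cons p rest ih =>
      intro sd
      simp only [List.foldl_cons]
      rw [ih, pvStep_length]

lemma pvScatter_get (maxx maxy : Int) (hx : 0 < maxx) (hy : 0 < maxy)
    (sample : List (List Int)) :
    ∀ (sd : List Int) (k : Nat),
      sd.length = maxy.toNat * maxx.toNat → k < sd.length →
      (sample.foldl (pvStep maxx maxy) sd)[k]? =
        some (if [((k % maxx.toNat : Nat) : Int), ((k / maxx.toNat : Nat) : Int)] ∈ sample
              then 1 else sd.getD k 0) := by
  set M := maxx.toNat with hMdef
  set N := maxy.toNat with hNdef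
  have hM0 : 0 < M := by omega
  have hxM : maxx = (M : Int) := by omega
  have hyN : maxy = (N : Int) := by omega
  induction sample with
  | nil =>
      intro sd k _ hk
      simp [List.getD_eq_getElem?_getD, List.getElem?_eq_getElem hk]
  | cons p rest ih =>
      intro sd k hlen hk
      have hkNM : k < N * M := hlen ▸ hk
      have hkMN : k < M * N := by rwa [Nat.mul_comm] at hkNM
      have hkM : k % M < M := Nat.mod_lt _ hM0
      have hkN : k / M < N := Nat.div_lt_of_lt_mul hkMN
      simp only [List.foldl_cons]
      have hlen' : (pvStep maxx maxy sd p).length = N * M := by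
        rw [pvStep_length]; exact hlen
      have hk' : k < (pvStep maxx maxy sd p).length := by rw [hlen']; exact hkNM
      rw [ih (pvStep maxx maxy sd p) k hlen' hk']
      rcases p with _ | ⟨j, _ | ⟨i, _ | ⟨x, t⟩⟩⟩
      · simp [pvStep]
      · simp [pvStep]
      · -- p = [j, i]
        by_cases hpt : j = ((k % M : Nat) : Int) ∧ i = ((k / M : Nat) : Int)
        · -- this point is exactly cell k
          obtain ⟨hj, hi⟩ := hpt
          subst hj hi
          have hguard : 0 ≤ ((k % M : Nat) : Int) ∧ ((k % M : Nat) : Int) < maxx ∧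
              0 ≤ ((k / M : Nat) : Int) ∧ ((k / M : Nat) : Int) < maxy := by
            refine ⟨Int.natCast_nonneg _, ?_, Int.natCast_nonneg _, ?_⟩
            · rw [hxM]; exact_mod_cast hkM
            · rw [hyN]; exact_mod_cast hkN
          have hpos : (((k / M : Nat) : Int) * maxx + ((k % M : Nat) : Int)).toNat = k := by
            rw [hxM]
            have hcast : ((k / M : Nat) : Int) * (M : Int) + ((k % M : Nat) : Int)
                = ((M * (k / M) + k % M : Nat) : Int) := by push_cast; ring
            rw [hcast, Int.toNat_natCast]
            exact Nat.div_add_mod k M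
          simp only [pvStep, hguard, and_self, if_pos]
          rw [hpos]
          have hmem : ([((k % M : Nat) : Int), ((k / M : Nat) : Int)] : List Int)
              ∈ [((k % M : Nat) : Int), ((k / M : Nat) : Int)] :: rest := List.mem_cons_self
          simp [List.getD_eq_getElem?_getD, List.getElem?_set_self hk]
        · -- a different cell (or an out-of-range point): entry k is unchanged
          have hne : (([((k % M : Nat) : Int), ((k / M : Nat) : Int)] : List Int)
              ∈ ([j, i] :: rest)) ↔
              ([((k % M : Nat) : Int), ((k / M : Nat) : Int)] : List Int) ∈ rest := by
            simp only [List.mem_cons, List.cons.injEq, and_true]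
            constructor
            · rintro (⟨h1, h2⟩ | h)
              · exact absurd ⟨h1.symm, h2.symm⟩ hpt
              · exact h
            · exact Or.inr
          simp only [hne]
          congr 1
          split
          · rfl
          · simp only [pvStep]
            split
            · rename_i hguard
              obtain ⟨hj0, hjx, hi0, hiy⟩ := hguard
              have hj' : ((j.toNat : Int)) = j := Int.toNat_of_nonneg hj0
              have hi' : ((i.toNat : Int)) = i := Int.toNat_of_nonneg hi0
              have hposne : (i * maxx + j).toNat ≠ k := by
                intro hcontra
                apply hpt
                have hjM2 : j.toNat < M := by omega
                have hcast : i * maxx + j = ((i.toNat * M + j.toNat : Nat) : Int) := by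
                  rw [hxM]; push_cast [hj', hi']; ring
                have hk_eq : k = i.toNat * M + j.toNat := by
                  rw [← hcontra, hcast, Int.toNat_natCast]
                have hmod : k % M = j.toNat := by
                  rw [hk_eq, Nat.mul_comm i.toNat M, Nat.mul_add_mod]
                  exact Nat.mod_eq_of_lt hjM2
                have hdiv : k / M = i.toNat := by
                  rw [hk_eq, Nat.mul_comm i.toNat M, Nat.mul_add_div hM0,
                    Nat.div_eq_of_lt hjM2]
                  omega
                rw [hmod, hdiv, hj', hi']
                exact ⟨rfl, rfl⟩
              rw [List.getD_eq_getElem?_getD, List.getD_eq_getElem?_getD,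
                List.getElem?_set_ne hposne]
            · rfl
      · simp [pvStep]

lemma doNormalize_alt_eq_specL (maxx maxy : Int) (sample : List (List Int)) :
    doNormalize_alt maxx maxy sample = pvSpecL maxx.toNat maxy.toNat sample := by
  unfold doNormalize_alt
  by_cases h : maxx ≤ 0 ∨ maxy ≤ 0
  · rw [if_pos h]
    unfold pvSpecL
    have hz : maxy.toNat * maxx.toNat = 0 := by
      rcases h with h | h
      · have : maxx.toNat = 0 := by omega
        simp [this]
      · have : maxy.toNat = 0 := by omega
        simp [this]
    simp [hz]
  · rw [if_neg h]
    push_neg at h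
    have hx : 0 < maxx := h.1
    have hy : 0 < maxy := h.2
    have hmm : maxx * maxy = ((maxx.toNat * maxy.toNat : Nat) : Int) := by
      have e1 : ((maxx.toNat : Int)) = maxx := Int.toNat_of_nonneg hx.le
      have e2 : ((maxy.toNat : Int)) = maxy := Int.toNat_of_nonneg hy.le
      push_cast [e1, e2]
      ring
    have hrep : (List.replicate (maxx * maxy).toNat (0 : Int)).length
        = maxy.toNat * maxx.toNat := by
      rw [List.length_replicate, hmm, Int.toNat_natCast, Nat.mul_comm]
    apply List.ext_getElem?
    intro k
    by_cases hk : k < maxy.toNat * maxx.toNat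
    · have hk' : k < (List.replicate (maxx * maxy).toNat (0 : Int)).length := by
        rw [hrep]; exact hk
      rw [pvScatter_get maxx maxy hx hy sample _ k hrep hk']
      unfold pvSpecL
      rw [List.getElem?_map, List.getElem?_range hk]
      simp only [Option.map_some, pvCell]
      have hk2 : k < (maxx * maxy).toNat := by
        have hh := hrep
        rw [List.length_replicate] at hh
        omega
      have hget : (List.replicate (maxx * maxy).toNat (0 : Int)).getD k 0 = 0 := by
        rw [List.getD_eq_getElem?_getD, List.getElem?_replicate]
        simp [hk2]
      rw [hget]
    · have h1 : (sample.foldl (pvStep maxx maxy)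
          (List.replicate (maxx * maxy).toNat 0)).length ≤ k := by
        rw [pvScatter_length, hrep]; omega
      have h2 : (pvSpecL maxx.toNat maxy.toNat sample).length ≤ k := by
        unfold pvSpecL; simp; omega
      rw [List.getElem?_eq_none h1, List.getElem?_eq_none h2]

-- ===== VERDICT (by name: the statement is the Claim_ definition above) =====
theorem doNormalize_spec : Claim_equal_doNormalize := by
  intro maxx maxy sample _
  unfold Spec_doNormalize
  rw [doNormalize_eq_specL, doNormalize_alt_eq_specL]
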